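-- pv_equiv track=rewrite | github.com/rafgia/temporal-graph-segmentation | baseline_apca.py | compute_hamming_distances
-- ===== SOURCE A (Python) =====
-- def extract_edges(snapshot):
--     edge_set = set()
--     for u in snapshot:
--         for v in snapshot[u]:
--             edge_set.add((min(u, v), max(u, v)))
--     return edge_set
--
-- def compute_hamming_distances(snapshots):
--     distances = []
--     for i in range(1, len(snapshots)):
--         edges_prev = extract_edges(snapshots[i - 1])
--         edges_curr = extract_edges(snapshots[i])
--         hamming_distance = len(edges_prev.symmetric_difference(edges_curr))
--         distances.append((i, hamming_distance))
--     return distances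
-- ===== SOURCE B (Python) =====
-- def compute_hamming_distances(snapshots):
--     # Sort-and-merge strategy: each snapshot's normalized edges become a sorted
--     # unique list; the distance between consecutive snapshots is counted by a
--     # two-pointer merge of the two sorted lists (elements in exactly one list),
--     # streaming over the snapshots with the previous sorted list as accumulator.
--     def sorted_edges(snap):
--         return sorted({(u, v) if u <= v else (v, u)
--                        for u, nbrs in snap.items() for v in nbrs})
--
--     distances = []
--     prev = None
--     for i, snap in enumerate(snapshots):
--         curr = sorted_edges(snap)
--         if prev is not None:
--             d = 0
--             p = q = 0
--             while p < len(prev) and q < len(curr):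
--                 if prev[p] == curr[q]:
--                     p += 1
--                     q += 1
--                 elif prev[p] < curr[q]:
--                     d += 1
--                     p += 1
--                 else:
--                     d += 1
--                     q += 1
--             d += (len(prev) - p) + (len(curr) - q)
--             distances.append((i, d))
--         prev = curr
--     return distances
-- ===== Notes on version B (the rewrite author's own statement) =====
-- stated objective: alternative
-- what changed: B replaces A's set symmetric-difference entirely: it streams over the snapshots keeping the previous snapshot's SORTED unique edge list, and counts each Hamming distance by a two-pointer merge of two sorted lists (elements present in exactly one), instead of A's indexed loop that re-extracts hash sets and materializes their symmetric difference.
import Mathlib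
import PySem

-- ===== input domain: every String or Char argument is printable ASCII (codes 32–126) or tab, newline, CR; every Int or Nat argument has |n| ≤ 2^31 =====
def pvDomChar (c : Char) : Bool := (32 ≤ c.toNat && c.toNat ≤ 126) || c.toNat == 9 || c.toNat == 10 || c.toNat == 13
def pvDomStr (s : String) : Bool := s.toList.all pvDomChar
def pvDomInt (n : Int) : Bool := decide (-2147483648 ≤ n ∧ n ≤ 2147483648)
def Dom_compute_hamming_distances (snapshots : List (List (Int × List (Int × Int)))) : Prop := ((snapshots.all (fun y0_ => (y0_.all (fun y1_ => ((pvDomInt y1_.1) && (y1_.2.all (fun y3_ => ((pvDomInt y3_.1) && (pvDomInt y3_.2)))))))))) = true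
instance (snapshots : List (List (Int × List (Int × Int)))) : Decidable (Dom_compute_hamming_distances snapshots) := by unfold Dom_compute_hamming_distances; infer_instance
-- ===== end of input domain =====

-- B drops A's hash-set symmetric difference: it streams over the snapshots keeping the previous
-- snapshot's sorted unique edge list and counts each distance by a two-pointer sorted merge
-- (objective: alternative algorithm — sort-and-merge instead of set operations).

-- ===== PORT A =====
-- extract_edges: for u in snapshot / for v in snapshot[u] (the inner dict's keys).
def pvExtractEdges (snapshot : List (Int × List (Int × Int))) : PySem.Set (Int × Int) :=
  snapshot.foldl (fun edge_set uv =>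
    uv.2.foldl (fun edge_set v =>
      edge_set.add (min uv.1 v.1, max uv.1 v.1)) edge_set)
    PySem.Set.empty

def compute_hamming_distances (snapshots : List (List (Int × List (Int × Int)))) : List (Int × Int) :=
  (PySem.List.pyRange 1 (snapshots.length : Int) 1).foldl (fun distances i =>
    let edges_prev := pvExtractEdges (PySem.List.pyGetD snapshots (i - 1) [])  -- index in range: i-1 < len
    let edges_curr := pvExtractEdges (PySem.List.pyGetD snapshots i [])
    let hamming_distance := PySem.Set.len (PySem.Set.symmDiff edges_prev edges_curr)
    distances ++ [(i, hamming_distance)]) []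

-- ===== PORT B =====
-- sorted({(u,v) if u <= v else (v,u) for u, nbrs in snap.items() for v in nbrs});
-- Python's sorted() on int pairs compares tuples, i.e. the lexicographic key (fst, snd): sorted2.
def pvSortedEdges (snap : List (Int × List (Int × Int))) : List (Int × Int) :=
  PySem.List.sorted2
    (PySem.Set.ofList (snap.flatMap (fun uv =>
      uv.2.map (fun v => if uv.1 ≤ v.1 then (uv.1, v.1) else (v.1, uv.1)))))
    Prod.fst Prod.snd

-- the two-pointer while loop: advancing a pointer = structural recursion on that list;
-- the final 'd += (len(prev)-p) + (len(curr)-q)' is the base case (remaining length).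
-- 'prev[p] < curr[q]' on int pairs is Python's lexicographic tuple comparison, spelled out.
def pvMergeCount : List (Int × Int) → List (Int × Int) → Int
  | [], ys => (ys.length : Int)
  | x :: xs, [] => ((x :: xs).length : Int)
  | x :: xs, y :: ys =>
    if x = y then pvMergeCount xs ys
    else if x.1 < y.1 ∨ (x.1 = y.1 ∧ x.2 < y.2) then 1 + pvMergeCount xs (y :: ys)
    else 1 + pvMergeCount (x :: xs) ys
termination_by xs ys => xs.length + ys.length

-- for i, snap in enumerate(snapshots), streaming with (prev sorted list, distances) as state
def compute_hamming_distances_alt (snapshots : List (List (Int × List (Int × Int)))) : List (Int × Int) :=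
  ((PySem.List.enumerate snapshots 0).foldl
    (fun (st : Option (List (Int × Int)) × List (Int × Int)) p =>
      let curr := pvSortedEdges p.2
      match st.1 with
      | none => (some curr, st.2)
      | some prev => (some curr, st.2 ++ [(p.1, pvMergeCount prev curr)]))
    (none, [])).2

-- ===== PRECONDITION & SPEC =====
def Spec_compute_hamming_distances (snapshots : List (List (Int × List (Int × Int)))) (out : List (Int × Int)) : Prop := out = compute_hamming_distances_alt snapshots
instance (snapshots : List (List (Int × List (Int × Int)))) (out : List (Int × Int)) : Decidable (Spec_compute_hamming_distances snapshots out) := by unfold Spec_compute_hamming_distances; infer_instance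

-- ===== CLAIM (what is proved, stated in full; the proofs are below) =====
def Claim_equal_compute_hamming_distances : Prop := ∀ (snapshots : List (List (Int × List (Int × Int)))), Dom_compute_hamming_distances snapshots → Spec_compute_hamming_distances snapshots (compute_hamming_distances snapshots)

-- ===== LEMMAS AND PROOFS =====

-- sorted2 with keys (fst, snd) is sorting by the lexicographic order on the pairs
theorem pv_before_eq :
    (fun (a b : Int × Int) => decide (a.1 < b.1) || (!decide (b.1 < a.1) && decide (a.2 < b.2)))
      = (fun a b => decide (toLex a < toLex b)) := by
  funext a b
  by_cases h1 : a.1 < b.1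
  · simp [Prod.Lex.lt_iff, h1]
  · by_cases h2 : b.1 < a.1
    · have h3 : ¬ (a.1 = b.1) := by omega
      simp [Prod.Lex.lt_iff, h1, h2, h3]
    · have h3 : a.1 = b.1 := by omega
      simp [Prod.Lex.lt_iff, h1, h2, h3]

theorem pv_sorted2_eq (xs : List (Int × Int)) :
    PySem.List.sorted2 xs Prod.fst Prod.snd
      = PySem.List.sorted xs (fun p => toLex p) := by
  rw [PySem.List.sorted_eq_foldl_insertBy]
  show List.foldl (fun acc x => PySem.List.insertBy
    (fun a b => decide (a.1 < b.1) || (!decide (b.1 < a.1) && decide (a.2 < b.2))) x acc) [] xs = _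
  rw [pv_before_eq]

-- the strict lexicographic order on int pairs, as B's merge compares them
def pvLexLt (x y : Int × Int) : Prop := x.1 < y.1 ∨ (x.1 = y.1 ∧ x.2 < y.2)

theorem pv_sorted_pairwise_lt (xs : List (Int × Int)) (hnd : xs.Nodup) :
    (PySem.List.sorted xs (fun p => toLex p)).Pairwise pvLexLt := by
  have h1 := PySem.List.sorted_pairwise xs (fun p : Int × Int => toLex p)
  have h2 : (PySem.List.sorted xs (fun p : Int × Int => toLex p) false).Nodup :=
    (PySem.List.sorted_perm xs _ false).nodup_iff.mpr hnd
  exact (h1.and h2).imp (fun {a b} hab => by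
    have hlt : toLex a < toLex b := lt_of_le_of_ne hab.1 (by simpa using hab.2)
    simpa [pvLexLt] using Prod.Lex.lt_iff.mp hlt)

theorem pvLexLt_trans {a b c : Int × Int} (h1 : pvLexLt a b) (h2 : pvLexLt b c) : pvLexLt a c := by
  unfold pvLexLt at *; omega

theorem pvLexLt_ne {a b : Int × Int} (h : pvLexLt a b) : a ≠ b := by
  rintro rfl; unfold pvLexLt at h; omega

-- an element strictly below the head of a strictly sorted list is not in the list
theorem pv_lt_head_notmem {x y : Int × Int} {ys : List (Int × Int)}
    (hb : (y :: ys).Pairwise pvLexLt) (h : pvLexLt x y) : ¬ x ∈ y :: ys := by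
  intro hm
  rcases List.mem_cons.mp hm with rfl | hm
  · exact pvLexLt_ne h rfl
  · exact pvLexLt_ne (pvLexLt_trans h ((List.pairwise_cons.mp hb).1 _ hm)) rfl

theorem pv_countP_cons_head_mem {w : Int × Int} {l m : List (Int × Int)} (hw : w ∈ m) :
    List.countP (fun z => !m.contains z) (w :: l) = List.countP (fun z => !m.contains z) l := by
  rw [List.countP_cons]; simp [hw]

theorem pv_countP_cons_head_notmem {w : Int × Int} {l m : List (Int × Int)} (hw : ¬ w ∈ m) :
    List.countP (fun z => !m.contains z) (w :: l) = List.countP (fun z => !m.contains z) l + 1 := by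
  rw [List.countP_cons]; simp [hw]

theorem pv_countP_contains_cons {w : Int × Int} {l m : List (Int × Int)} (hl : ∀ z ∈ l, z ≠ w) :
    List.countP (fun z => !(w :: m).contains z) l = List.countP (fun z => !m.contains z) l := by
  apply List.countP_congr; intro z hz; simp [hl z hz]

-- the two-pointer merge of two strictly sorted lists counts the elements in exactly one of them
theorem pvMergeCount_eq (a b : List (Int × Int))
    (ha : a.Pairwise pvLexLt) (hb : b.Pairwise pvLexLt) :
    pvMergeCount a b
      = ((a.countP (fun z => !b.contains z) + b.countP (fun z => !a.contains z) : Nat) : Int) := by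
  induction a generalizing b with
  | nil => simp [pvMergeCount]
  | cons x xs iha =>
    induction b with
    | nil => simp [pvMergeCount]
    | cons y ys ihb =>
      obtain ⟨hx, hxs⟩ := List.pairwise_cons.mp ha
      obtain ⟨hy, hys⟩ := List.pairwise_cons.mp hb
      by_cases hxy : x = y
      · subst hxy
        rw [pvMergeCount, if_pos rfl, iha ys hxs hys,
          pv_countP_cons_head_mem (List.mem_cons_self ..),
          pv_countP_cons_head_mem (List.mem_cons_self ..),
          pv_countP_contains_cons (l := xs) (m := ys) (fun z hz => fun e => pvLexLt_ne (hx z hz) e.symm),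
          pv_countP_contains_cons (l := ys) (m := xs) (fun z hz => fun e => pvLexLt_ne (hy z hz) e.symm)]
      · by_cases hlt : x.1 < y.1 ∨ (x.1 = y.1 ∧ x.2 < y.2)
        · have hnm : ¬ x ∈ y :: ys := pv_lt_head_notmem hb hlt
          rw [pvMergeCount, if_neg hxy, if_pos hlt, iha (y :: ys) hxs hb,
            pv_countP_cons_head_notmem hnm,
            pv_countP_contains_cons (l := y :: ys) (m := xs) (fun z hz e => by subst e; exact hnm hz)]
          push_cast; ring
        · have hylt : pvLexLt y x := by
            unfold pvLexLt
            have h1 : ¬ (x.1 < y.1 ∨ (x.1 = y.1 ∧ x.2 < y.2)) := hlt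
            have hne : ¬ (x.1 = y.1 ∧ x.2 = y.2) := by
              intro ⟨e1, e2⟩; exact hxy (Prod.ext e1 e2)
            omega
          have hnm : ¬ y ∈ x :: xs := pv_lt_head_notmem ha hylt
          rw [pvMergeCount, if_neg hxy, if_neg hlt, ihb hys,
            pv_countP_cons_head_notmem hnm,
            pv_countP_contains_cons (l := x :: xs) (m := ys) (fun z hz e => by subst e; exact hnm hz)]
          push_cast; ring

-- A's nested loop is Set.ofList of the flattened normalized-edge list
theorem pv_inner_fold {α β : Type} [BEq α] (f : β → α) (l : List β) (es : PySem.Set α) :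
    l.foldl (fun es v => es.add (f v)) es = (l.map f).foldl PySem.Set.add es := by
  induction l generalizing es with
  | nil => rfl
  | cons x xs ih => simp [List.foldl, ih]

theorem pv_outer_fold (s : List (Int × List (Int × Int))) (init : PySem.Set (Int × Int)) :
    s.foldl (fun edge_set uv =>
      uv.2.foldl (fun edge_set v => edge_set.add (min uv.1 v.1, max uv.1 v.1)) edge_set) init
    = (s.flatMap (fun uv => uv.2.map (fun v => (min uv.1 v.1, max uv.1 v.1)))).foldl
        PySem.Set.add init := by
  induction s generalizing init with
  | nil => rfl
  | cons uv rest ih =>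
      simp only [List.foldl_cons, List.flatMap_cons, List.foldl_append]
      rw [ih, pv_inner_fold (fun v => (min uv.1 v.1, max uv.1 v.1)) uv.2]

theorem pvExtractEdges_eq (s : List (Int × List (Int × Int))) :
    pvExtractEdges s
      = PySem.Set.ofList (s.flatMap (fun uv =>
          uv.2.map (fun v => (min uv.1 v.1, max uv.1 v.1)))) := by
  unfold pvExtractEdges
  rw [PySem.Set.ofList_eq_foldl, pv_outer_fold]
  rfl

-- B's conditional pair is the (min, max) pair
theorem pv_if_minmax (u v : Int) :
    (if u ≤ v then (u, v) else (v, u)) = (min u v, max u v) := by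
  by_cases h : u ≤ v
  · simp [min_def, max_def, h]
  · have h' : v ≤ u := by omega
    simp [min_def, max_def, h, h']

-- B's sorted unique edge list is A's edge set, sorted strictly lexicographically
theorem pvSortedEdges_eq_sorted (s : List (Int × List (Int × Int))) :
    pvSortedEdges s = PySem.List.sorted (pvExtractEdges s) (fun p => toLex p) := by
  unfold pvSortedEdges
  rw [pv_sorted2_eq, pvExtractEdges_eq]
  simp only [pv_if_minmax]

theorem pvSortedEdges_perm (s : List (Int × List (Int × Int))) :
    (pvSortedEdges s).Perm (pvExtractEdges s) := by
  rw [pvSortedEdges_eq_sorted]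
  exact PySem.List.sorted_perm _ _ _

theorem pvSortedEdges_pairwise (s : List (Int × List (Int × Int))) :
    (pvSortedEdges s).Pairwise pvLexLt := by
  rw [pvSortedEdges_eq_sorted]
  exact pv_sorted_pairwise_lt _ (by rw [pvExtractEdges_eq]; exact PySem.Set.nodup_ofList _)

theorem pv_contains_of_perm {l l' : List (Int × Int)} (h : l.Perm l') (z : Int × Int) :
    l.contains z = l'.contains z := by
  simp [h.mem_iff]

-- hence B's merge computes A's symmetric-difference cardinality
theorem pv_dist_eq (sa sb : List (Int × List (Int × Int))) :
    pvMergeCount (pvSortedEdges sa) (pvSortedEdges sb)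
      = PySem.Set.len (PySem.Set.symmDiff (pvExtractEdges sa) (pvExtractEdges sb)) := by
  rw [pvMergeCount_eq _ _ (pvSortedEdges_pairwise sa) (pvSortedEdges_pairwise sb)]
  have e1 : List.countP (fun z => !(pvSortedEdges sb).contains z) (pvSortedEdges sa)
      = List.countP (fun z => !(pvExtractEdges sb).contains z) (pvSortedEdges sa) :=
    List.countP_congr (fun z _ => by rw [pv_contains_of_perm (pvSortedEdges_perm sb) z]; exact Iff.rfl)
  have e2 : List.countP (fun z => !(pvSortedEdges sa).contains z) (pvSortedEdges sb)
      = List.countP (fun z => !(pvExtractEdges sa).contains z) (pvSortedEdges sb) :=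
    List.countP_congr (fun z _ => by rw [pv_contains_of_perm (pvSortedEdges_perm sa) z]; exact Iff.rfl)
  rw [e1, e2, (pvSortedEdges_perm sa).countP_eq, (pvSortedEdges_perm sb).countP_eq]
  unfold PySem.Set.symmDiff PySem.Set.diff PySem.Set.len
  rw [List.length_append, List.countP_eq_length_filter, List.countP_eq_length_filter]

-- B's streaming fold, characterised recursively
def pvPairs : Int → List (Int × Int) → List (List (Int × List (Int × Int))) → List (Int × Int)
  | _, _, [] => []
  | i, prev, s :: rest => (i, pvMergeCount prev (pvSortedEdges s)) :: pvPairs (i + 1) (pvSortedEdges s) rest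

theorem pv_stream (l : List (List (Int × List (Int × Int)))) (i : Int)
    (prev : List (Int × Int)) (acc : List (Int × Int)) :
    ((PySem.List.enumerate l i).foldl
      (fun (st : Option (List (Int × Int)) × List (Int × Int)) p =>
        let curr := pvSortedEdges p.2
        match st.1 with
        | none => (some curr, st.2)
        | some prev => (some curr, st.2 ++ [(p.1, pvMergeCount prev curr)]))
      (some prev, acc)).2 = acc ++ pvPairs i prev l := by
  induction l generalizing i prev acc with
  | nil => simp [PySem.List.enumerate_nil, pvPairs]
  | cons s rest ih =>
    rw [PySem.List.enumerate_cons]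
    simp only [List.foldl_cons]
    rw [ih]
    simp [pvPairs]

theorem pv_alt_eq_pairs (s0 : List (Int × List (Int × Int))) (rest : List (List (Int × List (Int × Int)))) :
    compute_hamming_distances_alt (s0 :: rest) = pvPairs 1 (pvSortedEdges s0) rest := by
  unfold compute_hamming_distances_alt
  rw [PySem.List.enumerate_cons]
  simp only [List.foldl_cons]
  exact pv_stream rest 1 (pvSortedEdges s0) []

theorem pvPairs_length (l : List (List (Int × List (Int × Int)))) (i : Int) (prev : List (Int × Int)) :
    (pvPairs i prev l).length = l.length := by
  induction l generalizing i prev with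
  | nil => rfl
  | cons s rest ih => simp [pvPairs, ih]

theorem pvPairs_getElem (l : List (List (Int × List (Int × Int)))) (i : Int) (prev : List (Int × Int))
    (k : Nat) (h : k < (pvPairs i prev l).length) :
    (pvPairs i prev l)[k]
      = (i + k, pvMergeCount ((prev :: l.map pvSortedEdges).getD k []) ((l.map pvSortedEdges).getD k [])) := by
  induction l generalizing i prev k with
  | nil => simp [pvPairs_length] at h
  | cons s rest ih =>
    cases k with
    | zero => simp [pvPairs]
    | succ k' =>
      have h' : k' < (pvPairs (i + 1) (pvSortedEdges s) rest).length := by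
        simpa [pvPairs, pvPairs_length] using h
      simp only [pvPairs, List.getElem_cons_succ, ih (i + 1) (pvSortedEdges s) k' h',
        List.map_cons, List.getD_cons_succ, Prod.mk.injEq]
      exact ⟨by push_cast; ring, trivial⟩

-- ===== VERDICT (by name: the statement is the Claim_ definition above) =====
theorem compute_hamming_distances_spec : Claim_equal_compute_hamming_distances := by
  intro snapshots _
  unfold Spec_compute_hamming_distances compute_hamming_distances
  rw [PySem.List.foldl_append_singleton_eq_map]
  simp only [List.nil_append]
  cases snapshots with
  | nil => rfl
  | cons s0 rest =>
    rw [pv_alt_eq_pairs]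
    apply List.ext_getElem
    · simp [PySem.List.length_pyRange_one, pvPairs_length]
    · intro k h1 h2
      have hk : k + 1 < (s0 :: rest).length := by
        simp [PySem.List.length_pyRange_one] at h1
        simp
        omega
      have hk' : k < rest.length := by simpa using hk
      rw [pvPairs_getElem rest 1 (pvSortedEdges s0) k h2]
      simp only [List.getElem_map, PySem.List.getElem_pyRange_one]
      have e1 : (1 : Int) + (k : Int) - 1 = ((k : Nat) : Int) := by omega
      have e2 : (1 : Int) + (k : Int) = (((k + 1 : Nat)) : Int) := by push_cast; omega
      rw [e1, e2, PySem.List.pyGetD_natCast, PySem.List.pyGetD_natCast]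
      have g1 : (pvSortedEdges s0 :: rest.map pvSortedEdges).getD k []
          = pvSortedEdges ((s0 :: rest).getD k []) := by
        rw [show (pvSortedEdges s0 :: rest.map pvSortedEdges) = (s0 :: rest).map pvSortedEdges by simp]
        rw [List.getD_eq_getElem?_getD, List.getD_eq_getElem?_getD, List.getElem?_map]
        have : k < (s0 :: rest).length := by simp; omega
        simp [List.getElem?_eq_getElem this]
      have g2 : (rest.map pvSortedEdges).getD k [] = pvSortedEdges ((s0 :: rest).getD (k + 1) []) := by
        rw [List.getD_eq_getElem?_getD, List.getD_eq_getElem?_getD, List.getElem?_map]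
        simp [List.getElem?_eq_getElem hk', List.getElem?_eq_getElem hk]
      rw [g1, g2, pv_dist_eq]
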